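-- pv_equiv track=rewrite | github.com/Nazrin221b/challengers-club-adventure | MS-WarmUp/queen's attack 2.py | queensAttack
-- ===== SOURCE A (Python) =====
-- def queensAttack(n, k, r_q, c_q, obstacles):
--     no, s, w, e, nw , ne, sw,se = 0,0,0,0,0,0,0, 0
--     north=r_q
--     while north<n:
--         no+=1
--         north+=1
--     south=r_q
--     while south>1:
--         s+=1
--         south-=1
--     west=c_q
--     while west>1:
--         w+=1
--         west-=1
--     east=c_q
--     while east <n:
--         e+=1
--         east+=1
--
--     n_east1=r_q
--     n_east2=c_q
--     while n_east1 < n and n_east2 < n: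
--         ne+=1
--         n_east1+=1
--         n_east2+=1
--
--     n_west1=r_q
--     n_west2=c_q
--     while n_west1<n and n_west2>1:
--         nw+=1
--         n_west1+=1
--         n_west2-=1
--
--     s_west1=r_q
--     s_west2=c_q
--     while s_west1>1 and s_west2>1:
--         sw+=1
--         s_west1-=1
--         s_west2-=1
--
--     s_east1=r_q
--     s_east2=c_q
--     while s_east1>1 and s_east2 <n:
--         se+=1
--         s_east1-=1
--         s_east2+=1
--
--
--     return s+no + w + e + ne+ nw + se+sw
-- ===== SOURCE B (Python) =====
-- def queensAttack(n, k, r_q, c_q, obstacles):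
--     up = n - r_q
--     down = r_q - 1
--     left = c_q - 1
--     right = n - c_q
--     dirs = [up, down, left, right,
--             min(up, right), min(up, left), min(down, left), min(down, right)]
--     return sum(max(0, d) for d in dirs)
-- ===== Notes on version B (the rewrite author's own statement) =====
-- stated objective: faster
-- what changed: Replaced the eight step-by-step while loops with closed-form distances to the board edges (max(0,·) of differences and mins), summed in one expression.
import Mathlib
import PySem

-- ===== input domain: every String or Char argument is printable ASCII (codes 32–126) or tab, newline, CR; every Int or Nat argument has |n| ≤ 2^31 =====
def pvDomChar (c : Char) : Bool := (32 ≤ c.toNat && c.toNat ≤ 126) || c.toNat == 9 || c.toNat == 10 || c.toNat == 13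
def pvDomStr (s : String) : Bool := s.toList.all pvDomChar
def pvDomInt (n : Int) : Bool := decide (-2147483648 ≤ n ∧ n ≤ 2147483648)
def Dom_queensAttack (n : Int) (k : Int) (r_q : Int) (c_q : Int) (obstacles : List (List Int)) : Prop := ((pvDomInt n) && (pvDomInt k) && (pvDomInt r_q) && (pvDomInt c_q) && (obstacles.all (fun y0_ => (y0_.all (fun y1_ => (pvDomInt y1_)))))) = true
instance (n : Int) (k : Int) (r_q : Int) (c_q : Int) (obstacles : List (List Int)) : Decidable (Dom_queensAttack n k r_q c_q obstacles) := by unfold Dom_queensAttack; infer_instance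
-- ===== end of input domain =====

-- B replaces A's eight counting while-loops by closed-form distances to the board edges (both ignore k and obstacles, as A does).


-- ===== PORT A =====
-- loop 'while cur < bound: cnt+=1; cur+=1'
def pvCountUp (cnt cur bound : Int) : Int :=
  if cur < bound then pvCountUp (cnt + 1) (cur + 1) bound else cnt
termination_by (bound - cur).toNat
decreasing_by omega

-- loop 'while cur > 1: cnt+=1; cur-=1'
def pvCountDown (cnt cur : Int) : Int :=
  if 1 < cur then pvCountDown (cnt + 1) (cur - 1) else cnt
termination_by (cur - 1).toNat
decreasing_by omega

-- loop 'while a < n and b < n: cnt+=1; a+=1; b+=1'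
def pvDiagNE (cnt a b n : Int) : Int :=
  if a < n ∧ b < n then pvDiagNE (cnt + 1) (a + 1) (b + 1) n else cnt
termination_by (n - a).toNat
decreasing_by omega

-- loop 'while a < n and b > 1: cnt+=1; a+=1; b-=1'
def pvDiagNW (cnt a b n : Int) : Int :=
  if a < n ∧ 1 < b then pvDiagNW (cnt + 1) (a + 1) (b - 1) n else cnt
termination_by (n - a).toNat
decreasing_by omega

-- loop 'while a > 1 and b > 1: cnt+=1; a-=1; b-=1'
def pvDiagSW (cnt a b : Int) : Int :=
  if 1 < a ∧ 1 < b then pvDiagSW (cnt + 1) (a - 1) (b - 1) else cnt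
termination_by (a - 1).toNat
decreasing_by omega

-- loop 'while a > 1 and b < n: cnt+=1; a-=1; b+=1'
def pvDiagSE (cnt a b n : Int) : Int :=
  if 1 < a ∧ b < n then pvDiagSE (cnt + 1) (a - 1) (b + 1) n else cnt
termination_by (a - 1).toNat
decreasing_by omega

def queensAttack (n : Int) (k : Int) (r_q : Int) (c_q : Int) (obstacles : List (List Int)) : Int :=
  let no := pvCountUp 0 r_q n
  let s  := pvCountDown 0 r_q
  let w  := pvCountDown 0 c_q
  let e  := pvCountUp 0 c_q n
  let ne := pvDiagNE 0 r_q c_q n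
  let nw := pvDiagNW 0 r_q c_q n
  let sw := pvDiagSW 0 r_q c_q
  let se := pvDiagSE 0 r_q c_q n
  s + no + w + e + ne + nw + se + sw

-- ===== PORT B =====
-- B: closed-form distances to the board edges, summed
def queensAttack_alt (n : Int) (k : Int) (r_q : Int) (c_q : Int) (obstacles : List (List Int)) : Int :=
  let up := n - r_q
  let down := r_q - 1
  let left := c_q - 1
  let right := n - c_q
  (([up, down, left, right, min up right, min up left, min down left, min down right]).map
    (fun d => max 0 d)).sum

-- ===== PRECONDITION & SPEC =====
def Spec_queensAttack (n : Int) (k : Int) (r_q : Int) (c_q : Int) (obstacles : List (List Int)) (out : Int) : Prop := out = queensAttack_alt n k r_q c_q obstacles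
instance (n : Int) (k : Int) (r_q : Int) (c_q : Int) (obstacles : List (List Int)) (out : Int) : Decidable (Spec_queensAttack n k r_q c_q obstacles out) := by unfold Spec_queensAttack; infer_instance

-- ===== CLAIM (what is proved, stated in full; the proofs are below) =====
def Claim_equal_queensAttack : Prop := ∀ (n : Int) (k : Int) (r_q : Int) (c_q : Int) (obstacles : List (List Int)), Dom_queensAttack n k r_q c_q obstacles → Spec_queensAttack n k r_q c_q obstacles (queensAttack n k r_q c_q obstacles)

-- ===== LEMMAS AND PROOFS =====
theorem pvCountUp_eq (cnt cur bound : Int) : pvCountUp cnt cur bound = cnt + max 0 (bound - cur) := by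
  fun_induction pvCountUp cnt cur bound with
  | case1 _ _ h ih => rw [ih]; omega
  | case2 _ _ h => omega

theorem pvCountDown_eq (cnt cur : Int) : pvCountDown cnt cur = cnt + max 0 (cur - 1) := by
  fun_induction pvCountDown cnt cur with
  | case1 _ _ h ih => rw [ih]; omega
  | case2 _ _ h => omega

theorem pvDiagNE_eq (cnt a b n : Int) : pvDiagNE cnt a b n = cnt + max 0 (min (n - a) (n - b)) := by
  fun_induction pvDiagNE cnt a b n with
  | case1 _ _ _ h ih => rw [ih]; omega
  | case2 _ _ _ h => omega

theorem pvDiagNW_eq (cnt a b n : Int) : pvDiagNW cnt a b n = cnt + max 0 (min (n - a) (b - 1)) := by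
  fun_induction pvDiagNW cnt a b n with
  | case1 _ _ _ h ih => rw [ih]; omega
  | case2 _ _ _ h => omega

theorem pvDiagSW_eq (cnt a b : Int) : pvDiagSW cnt a b = cnt + max 0 (min (a - 1) (b - 1)) := by
  fun_induction pvDiagSW cnt a b with
  | case1 _ _ _ h ih => rw [ih]; omega
  | case2 _ _ _ h => omega

theorem pvDiagSE_eq (cnt a b n : Int) : pvDiagSE cnt a b n = cnt + max 0 (min (a - 1) (n - b)) := by
  fun_induction pvDiagSE cnt a b n with
  | case1 _ _ _ h ih => rw [ih]; omega
  | case2 _ _ _ h => omega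

-- ===== VERDICT (by name: the statement is the Claim_ definition above) =====
theorem queensAttack_spec : Claim_equal_queensAttack := by
  intro n k r_q c_q obstacles _
  unfold Spec_queensAttack queensAttack queensAttack_alt
  simp only [pvCountUp_eq, pvCountDown_eq, pvDiagNE_eq, pvDiagNW_eq, pvDiagSW_eq, pvDiagSE_eq,
    List.map_cons, List.map_nil, List.sum_cons, List.sum_nil]
  omega
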